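-- pv_equiv track=rewrite | github.com/curtainjsh/data_science | break_the_palindrome.py | breakPalindrome
-- ===== SOURCE A (Python) =====
-- def breakPalindrome(palindromeStr):
--     # variable to detect if change was possible
--     flag = 0
--     # make list out of string
--     listStr = list(palindromeStr)
--
--     # if list/string size is even
--     if (len(listStr) % 2 == 0):
--         # iterate first half characters
--         for i in range(0, int(len(listStr) / 2)):
--             # if there's a character that's not a, change it to a
--             # set flag and break loop
--             if (listStr[i] != 'a'):
--                 listStr[i] = 'a'
--                 flag = 1
--                 break
--     # if list/string size is odd
--     else:
--         # iterate first half characters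
--         for i in range(0, int(len(listStr) / 2)):
--             # if there's a character that's not a, change it to a
--             # set flag and break loop
--             if (listStr[i] != 'a'):
--                 listStr[i] = 'a'
--                 flag = 1
--                 break
--
--     # if flag is set, join list and return
--     if flag == 1:
--         return ''.join(listStr)
--
--     # else return IMPOSSIBLE
--     return 'IMPOSSIBLE'
-- ===== SOURCE B (Python) =====
-- def breakPalindrome(palindromeStr):
--     # Divide and conquer: leftmost index i in [lo, hi) with palindromeStr[i] != 'a',
--     # found by recursive interval halving (left half wins), else None.
--     def first_non_a(lo, hi):
--         if hi - lo <= 1: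
--             return lo if lo < hi and palindromeStr[lo] != 'a' else None
--         mid = (lo + hi) // 2
--         left = first_non_a(lo, mid)
--         return left if left is not None else first_non_a(mid, hi)
--
--     i = first_non_a(0, len(palindromeStr) // 2)
--     if i is None:
--         return 'IMPOSSIBLE'
--     return palindromeStr[:i] + 'a' + palindromeStr[i + 1:]
-- ===== Notes on version B (the rewrite author's own statement) =====
-- stated objective: alternative
-- what changed: Replaces A's linear first-half scan with flag, in-place list mutation and join by a divide-and-conquer search (leftmost non-'a' index via recursive interval halving) and slice-based string reconstruction.
import Mathlib
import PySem

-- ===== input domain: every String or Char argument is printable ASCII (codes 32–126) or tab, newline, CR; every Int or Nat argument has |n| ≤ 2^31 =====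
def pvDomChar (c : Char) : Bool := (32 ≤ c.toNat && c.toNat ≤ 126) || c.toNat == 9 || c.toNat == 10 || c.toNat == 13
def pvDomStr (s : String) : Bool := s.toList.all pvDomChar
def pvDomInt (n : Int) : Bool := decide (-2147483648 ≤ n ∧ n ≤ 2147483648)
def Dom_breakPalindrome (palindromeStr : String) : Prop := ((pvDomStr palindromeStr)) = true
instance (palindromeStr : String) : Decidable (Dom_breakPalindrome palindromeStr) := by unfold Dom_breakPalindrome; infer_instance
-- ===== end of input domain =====

-- B replaces A's linear flag/mutate/join scan of the first half by a divide-and-conquer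
-- search for the leftmost non-'a' index plus slice-based reconstruction (alternative).

-- ===== PORT A =====
-- A's 'for i in range(0, int(len/2)): if listStr[i] != 'a': set; flag = 1; break':
-- index loop with break, yielding the first index of a non-'a' char in the first half
-- (flag = 1) or none (flag stays 0).
def breakALoop (l : List Char) (h i : Nat) : Option Nat :=
  if i < h then
    if l.getD i ' ' ≠ 'a' then some i
    else breakALoop l h (i + 1)
  else none
termination_by h - i

def breakPalindrome (palindromeStr : String) : String :=
  let listStr := palindromeStr.toList
  -- Python's int(len/2) on a nonnegative length is floor division = Nat division;
  -- the even and odd branches of A are kept separately, as in the source.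
  if listStr.length % 2 == 0 then
    match breakALoop listStr (listStr.length / 2) 0 with
    | some i => String.ofList (listStr.set i 'a')   -- listStr[i] = 'a'; ''.join(listStr)
    | none => "IMPOSSIBLE"
  else
    match breakALoop listStr (listStr.length / 2) 0 with
    | some i => String.ofList (listStr.set i 'a')
    | none => "IMPOSSIBLE"

-- ===== PORT B =====
-- B's first_non_a(lo, hi): divide and conquer, leftmost non-'a' index in [lo, hi).
-- (The base case reads s[lo] only under lo < hi, as the Python 'and' does.)
def firstNonA (l : List Char) (lo hi : Nat) : Option Nat :=
  if hi ≤ lo + 1 then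
    if lo < hi ∧ l.getD lo ' ' ≠ 'a' then some lo else none
  else
    let mid := (lo + hi) / 2
    match firstNonA l lo mid with
    | some i => some i
    | none => firstNonA l mid hi
termination_by hi - lo
decreasing_by all_goals omega

def breakPalindrome_alt (palindromeStr : String) : String :=
  let l := palindromeStr.toList
  match firstNonA l 0 (l.length / 2) with
  | none => "IMPOSSIBLE"
  | some i => String.ofList (l.take i ++ 'a' :: l.drop (i + 1))   -- s[:i] + 'a' + s[i+1:]

-- ===== PRECONDITION & SPEC =====
def Spec_breakPalindrome (palindromeStr : String) (out : String) : Prop := out = breakPalindrome_alt palindromeStr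
instance (palindromeStr : String) (out : String) : Decidable (Spec_breakPalindrome palindromeStr out) := by unfold Spec_breakPalindrome; infer_instance

-- ===== CLAIM (what is proved, stated in full; the proofs are below) =====
def Claim_equal_breakPalindrome : Prop := ∀ (palindromeStr : String), Dom_breakPalindrome palindromeStr → Spec_breakPalindrome palindromeStr (breakPalindrome palindromeStr)

-- ===== LEMMAS AND PROOFS =====

-- A's loop splits at any midpoint: scan [lo,hi) = scan [lo,mid) orElse scan [mid,hi).
lemma breakALoop_split (l : List Char) (mid hi : Nat) (hmh : mid ≤ hi) : ∀ lo, lo ≤ mid →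
    breakALoop l hi lo =
      (match breakALoop l mid lo with
       | some i => some i
       | none => breakALoop l hi mid) := by
  intro lo
  induction lo using breakALoop.induct l mid with
  | case1 i hlt hne =>
    intro _
    rw [breakALoop, if_pos (lt_of_lt_of_le hlt hmh), if_pos hne]
    rw [breakALoop, if_pos hlt, if_pos hne]
  | case2 i hlt heq ih =>
    intro _
    rw [breakALoop, if_pos (lt_of_lt_of_le hlt hmh), if_neg heq]
    conv_rhs => rw [breakALoop, if_pos hlt, if_neg heq]
    exact ih hlt
  | case3 i hge =>
    intro hle
    have hmi : i = mid := le_antisymm hle (le_of_not_gt hge)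
    rw [hmi, show breakALoop l mid mid = none from by rw [breakALoop]; simp]

-- A's loop only returns indices below its bound.
lemma breakALoop_lt (l : List Char) (h : Nat) : ∀ i j, breakALoop l h i = some j → j < h := by
  intro i
  induction i using breakALoop.induct l h with
  | case1 i hlt hne =>
    intro j hj
    rw [breakALoop, if_pos hlt, if_pos hne] at hj
    injection hj with hij
    omega
  | case2 i hlt heq ih =>
    intro j hj
    rw [breakALoop, if_pos hlt, if_neg heq] at hj
    exact ih j hj
  | case3 i hge =>
    intro j hj
    rw [breakALoop, if_neg hge] at hj
    simp at hj

-- B's divide-and-conquer search computes exactly what A's left-to-right loop computes.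
lemma firstNonA_eq (l : List Char) : ∀ lo hi, firstNonA l lo hi = breakALoop l hi lo := by
  intro lo hi
  induction lo, hi using firstNonA.induct l with
  | case1 lo hi hsmall hc =>
    rw [firstNonA, if_pos hsmall, if_pos hc]
    obtain ⟨hlh, hne⟩ := hc
    rw [breakALoop, if_pos hlh, if_pos hne]
  | case2 lo hi hsmall hc =>
    rw [firstNonA, if_pos hsmall, if_neg hc]
    by_cases hlh : lo < hi
    · rw [breakALoop, if_pos hlh, if_neg (by tauto)]
      rw [breakALoop, if_neg (by omega)]
    · rw [breakALoop, if_neg hlh]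
  | case3 lo hi hbig mid i hsome ih =>
    rw [firstNonA, if_neg hbig]
    have hsome' : firstNonA l lo ((lo + hi) / 2) = some i := hsome
    have ih' : firstNonA l lo ((lo + hi) / 2) = breakALoop l ((lo + hi) / 2) lo := ih
    show (match firstNonA l lo ((lo + hi) / 2) with
          | some i => some i
          | none => firstNonA l ((lo + hi) / 2) hi) = breakALoop l hi lo
    rw [breakALoop_split l ((lo + hi) / 2) hi (by omega) lo (by omega), ← ih', hsome']
  | case4 lo hi hbig mid hnone ih1 ih2 =>
    rw [firstNonA, if_neg hbig]
    have hnone' : firstNonA l lo ((lo + hi) / 2) = none := hnone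
    have ih1' : firstNonA l lo ((lo + hi) / 2) = breakALoop l ((lo + hi) / 2) lo := ih1
    have ih2' : firstNonA l ((lo + hi) / 2) hi = breakALoop l hi ((lo + hi) / 2) := ih2
    show (match firstNonA l lo ((lo + hi) / 2) with
          | some i => some i
          | none => firstNonA l ((lo + hi) / 2) hi) = breakALoop l hi lo
    rw [breakALoop_split l ((lo + hi) / 2) hi (by omega) lo (by omega), ← ih1', hnone']
    exact ih2'

-- ===== VERDICT (by name: the statement is the Claim_ definition above) =====
theorem breakPalindrome_spec : Claim_equal_breakPalindrome := by
  intro s _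
  unfold Spec_breakPalindrome breakPalindrome breakPalindrome_alt
  dsimp only
  rw [firstNonA_eq]
  cases h : breakALoop s.toList (s.toList.length / 2) 0 with
  | none => split <;> simp
  | some i =>
    have hi : i < s.toList.length := by
      have := breakALoop_lt s.toList (s.toList.length / 2) 0 i h
      have := Nat.div_le_self s.toList.length 2
      omega
    have hset : s.toList.set i 'a' = s.toList.take i ++ 'a' :: s.toList.drop (i + 1) := by
      rw [List.set_eq_take_append_cons_drop, if_pos hi]
    split <;> simp [hset]
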